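-- pv_equiv track=rewrite | github.com/JamesJeffryes/advent_of_code_2018 | day02.py | count_boxes
-- ===== SOURCE A (Python) =====
-- from collections import Counter
--
-- def count_boxes(box_ids):
--     dup_count = Counter()
--     for box in box_ids:
--         letter_count = Counter(box)
--         counts = set(letter_count.values())
--         for count in counts:
--             dup_count[count] += 1
--     return dup_count[2] * dup_count[3]
-- ===== SOURCE B (Python) =====
-- def count_boxes(box_ids):
--     twos = 0
--     threes = 0
--     for box in box_ids:
--         s = sorted(box)
--         has2 = False
--         has3 = False
--         i = 0
--         n = len(s)
--         while i < n:
--             j = i + 1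
--             while j < n and s[j] == s[i]:
--                 j += 1
--             run = j - i
--             if run == 2:
--                 has2 = True
--             elif run == 3:
--                 has3 = True
--             i = j
--         if has2:
--             twos += 1
--         if has3:
--             threes += 1
--     return twos * threes
-- ===== Notes on version B (the rewrite author's own statement) =====
-- stated objective: alternative
-- what changed: Instead of building a Counter per box and accumulating a Counter of multiplicities, B sorts each box's letters and scans the sorted runs with two index pointers, flagging runs of length exactly 2 or 3, tallying both in one pass and multiplying the tallies.
import Mathlib
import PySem

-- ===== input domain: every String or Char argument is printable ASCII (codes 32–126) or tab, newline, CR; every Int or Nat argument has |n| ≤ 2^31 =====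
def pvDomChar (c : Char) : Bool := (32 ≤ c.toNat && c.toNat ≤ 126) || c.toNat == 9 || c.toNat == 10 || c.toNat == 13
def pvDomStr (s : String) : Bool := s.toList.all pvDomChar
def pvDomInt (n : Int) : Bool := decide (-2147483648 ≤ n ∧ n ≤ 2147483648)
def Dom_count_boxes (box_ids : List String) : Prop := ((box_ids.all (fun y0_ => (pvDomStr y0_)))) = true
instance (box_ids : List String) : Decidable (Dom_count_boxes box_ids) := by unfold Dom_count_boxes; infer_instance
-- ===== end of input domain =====

-- B sorts each box and scans run-lengths with two pointers instead of building Counter tables; return value only.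
-- ===== PORT A =====
def pvStepA (d : PySem.Dict Int Int) (box : String) : PySem.Dict Int Int :=
  let letter_count := PySem.Dict.counter box.toList
  let counts : PySem.Set Int := PySem.Set.ofList letter_count.values
  counts.foldl (fun d c => d.modify c 0 (· + 1)) d

def count_boxes (box_ids : List String) : Int :=
  let dup_count := box_ids.foldl pvStepA PySem.Dict.empty
  dup_count.getD 2 0 * dup_count.getD 3 0

-- ===== PORT B =====
-- the inner while loop: advance over the run of the head char, flag runs of length 2 / 3
def pvRunScan : List Char → Bool → Bool → Bool × Bool
  | [], h2, h3 => (h2, h3)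
  | c :: t, h2, h3 =>
    let run := (t.takeWhile (· == c)).length + 1
    let rest := t.dropWhile (· == c)
    if run = 2 then pvRunScan rest true h3
    else if run = 3 then pvRunScan rest h2 true
    else pvRunScan rest h2 h3
termination_by l => l.length
decreasing_by all_goals
  simp only [List.length_cons]
  exact Nat.lt_succ_of_le (t.length_dropWhile_le _)

def count_boxes_alt (box_ids : List String) : Int :=
  let p := box_ids.foldl (fun (acc : Int × Int) box =>
    let s := PySem.List.sorted box.toList (fun c => c) false
    let f := pvRunScan s false false
    (acc.1 + (if f.1 then 1 else 0), acc.2 + (if f.2 then 1 else 0))) ((0 : Int), (0 : Int))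
  p.1 * p.2

-- ===== PRECONDITION & SPEC =====
def Spec_count_boxes (box_ids : List String) (out : Int) : Prop := out = count_boxes_alt box_ids
instance (box_ids : List String) (out : Int) : Decidable (Spec_count_boxes box_ids out) := by unfold Spec_count_boxes; infer_instance

-- ===== CLAIM (what is proved, stated in full; the proofs are below) =====
def Claim_equal_count_boxes : Prop := ∀ (box_ids : List String), Dom_count_boxes box_ids → Spec_count_boxes box_ids (count_boxes box_ids)

-- ===== LEMMAS AND PROOFS =====

-- "some letter occurs exactly k times in l" — the bridge predicate between the two ports
def pvHasK (l : List Char) (k : Nat) : Bool := l.any (fun c => l.count c == k)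

-- A-side: one box adds 1 to slot k iff some letter occurs exactly k times
lemma pvStepA_getD (box : String) (d : PySem.Dict Int Int) (k : Nat) :
    (pvStepA d box).getD (k : Int) 0
      = d.getD (k : Int) 0 + (if pvHasK box.toList k then 1 else 0) := by
  unfold pvStepA
  rw [PySem.Dict.getD_foldl_modify_add_one]
  congr 1
  have hnd := PySem.Set.nodup_ofList (PySem.Dict.counter box.toList).values
  have hiff : ((k : Int) ∈ PySem.Set.ofList (PySem.Dict.counter box.toList).values)
      ↔ pvHasK box.toList k = true := by
    rw [PySem.Set.mem_ofList,
      PySem.Dict.values_eq_map_keys _ (PySem.Dict.nodup_keys_counter box.toList) 0]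
    unfold pvHasK
    rw [List.any_eq_true]
    constructor
    · intro hk
      obtain ⟨c, hc, hck⟩ := List.mem_map.mp hk
      rw [PySem.Dict.keys_counter] at hc
      rw [PySem.Dict.getD_counter] at hck
      exact ⟨c, (PySem.Set.mem_ofList _ _).mp hc, by rw [beq_iff_eq]; exact_mod_cast hck⟩
    · rintro ⟨c, hc, hck⟩
      rw [beq_iff_eq] at hck
      refine List.mem_map.mpr ⟨c, ?_, ?_⟩
      · rw [PySem.Dict.keys_counter]; exact (PySem.Set.mem_ofList _ _).mpr hc
      · rw [PySem.Dict.getD_counter]; exact_mod_cast hck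
  by_cases h : pvHasK box.toList k
  · simp only [h, if_true]
    exact_mod_cast List.count_eq_one_of_mem hnd (hiff.mpr h)
  · simp only [h]
    exact_mod_cast List.count_eq_zero_of_not_mem (fun hm => h (hiff.mp hm))

-- sorted-list facts for the run scan
lemma pvRest_not_mem (c : Char) (t : List Char) (h : (c :: t).Pairwise (· ≤ ·)) :
    c ∉ t.dropWhile (· == c) := by
  induction t with
  | nil => simp
  | cons a t' ih =>
    rw [List.dropWhile_cons]
    by_cases hac : a = c
    · subst hac
      simp only [beq_self_eq_true, if_true]
      apply ih
      rcases List.pairwise_cons.mp h with ⟨h1, h2⟩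
      rcases List.pairwise_cons.mp h2 with ⟨h3, h4⟩
      exact List.pairwise_cons.mpr ⟨fun x hx => h1 x (List.mem_cons_of_mem _ hx), h4⟩
    · simp only [beq_iff_eq, hac, if_false]
      intro hmem
      rcases List.mem_cons.mp hmem with h' | h'
      · exact hac h'.symm
      · rcases List.pairwise_cons.mp h with ⟨h1, h2⟩
        rcases List.pairwise_cons.mp h2 with ⟨h3, h4⟩
        have hca : c ≤ a := h1 a (List.mem_cons_self)
        have hac' : a ≤ c := h3 c h'
        exact hac (le_antisymm hac' hca)

lemma pvCount_head (c : Char) (t : List Char) (h : (c :: t).Pairwise (· ≤ ·)) :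
    (c :: t).count c = (t.takeWhile (· == c)).length + 1 := by
  rw [List.count_cons_self]
  congr 1
  conv_lhs => rw [← List.takeWhile_append_dropWhile (p := (· == c)) (l := t)]
  rw [List.count_append]
  have h1 : (t.takeWhile (· == c)).count c = (t.takeWhile (· == c)).length :=
    List.count_eq_length.mpr (fun b hb => by
      have := List.mem_takeWhile_imp hb; exact (beq_iff_eq.mp this).symm)
  have h2 : (t.dropWhile (· == c)).count c = 0 :=
    List.count_eq_zero.mpr (pvRest_not_mem c t h)
  omega

lemma pvCount_rest (c : Char) (t : List Char) (x : Char) (hx : x ≠ c) :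
    (t.dropWhile (· == c)).count x = (c :: t).count x := by
  rw [List.count_cons_of_ne (Ne.symm hx)]
  conv_rhs => rw [← List.takeWhile_append_dropWhile (p := (· == c)) (l := t)]
  rw [List.count_append]
  have h1 : (t.takeWhile (· == c)).count x = 0 :=
    List.count_eq_zero.mpr (fun hm => hx (by simpa using List.mem_takeWhile_imp hm))
  omega

-- on a sorted list, the head's run covers all its occurrences
lemma pvHasK_cons_sorted (c : Char) (t : List Char) (h : (c :: t).Pairwise (· ≤ ·)) (k : Nat) :
    pvHasK (c :: t) k
      = (decide ((t.takeWhile (· == c)).length + 1 = k) || pvHasK (t.dropWhile (· == c)) k) := by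
  rw [Bool.eq_iff_iff]
  unfold pvHasK
  simp only [Bool.or_eq_true, List.any_eq_true, beq_iff_eq, decide_eq_true_eq]
  constructor
  · rintro ⟨x, hx, hcount⟩
    by_cases hxc : x = c
    · subst hxc
      left; rw [← pvCount_head x t h]; exact hcount
    · right
      refine ⟨x, ?_, by rw [pvCount_rest c t x hxc]; exact hcount⟩
      rcases List.mem_cons.mp hx with h' | h'
      · exact absurd h' hxc
      · conv at h' => rw [← List.takeWhile_append_dropWhile (p := (· == c)) (l := t)]
        rcases List.mem_append.mp h' with h'' | h''
        · exact absurd (beq_iff_eq.mp (List.mem_takeWhile_imp (p := (· == c)) h'')) hxc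
        · exact h''
  · rintro (hk | ⟨x, hx, hcount⟩)
    · exact ⟨c, List.mem_cons_self, by rw [pvCount_head c t h]; exact hk⟩
    · have hxc : x ≠ c := fun he => pvRest_not_mem c t h (he ▸ hx)
      refine ⟨x, ?_, by rw [← pvCount_rest c t x hxc]; exact hcount⟩
      exact List.mem_cons_of_mem _ ((t.dropWhile_sublist _).mem hx)

-- run scan on a sorted list computes exactly the pvHasK flags
lemma pvRunScan_eq : ∀ (n : Nat) (l : List Char), l.length ≤ n → l.Pairwise (· ≤ ·) →
    ∀ h2 h3, pvRunScan l h2 h3 = (h2 || pvHasK l 2, h3 || pvHasK l 3) := by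
  intro n
  induction n with
  | zero =>
    intro l hl _ h2 h3
    have : l = [] := List.length_eq_zero_iff.mp (Nat.le_zero.mp hl)
    subst this
    simp [pvRunScan, pvHasK]
  | succ n ih =>
    intro l hl hp h2 h3
    match l with
    | [] => simp [pvRunScan, pvHasK]
    | c :: t =>
      have hrest_len : (t.dropWhile (· == c)).length ≤ n := by
        have := t.length_dropWhile_le (· == c)
        simp only [List.length_cons] at hl
        omega
      have hrest_sorted : (t.dropWhile (· == c)).Pairwise (· ≤ ·) :=
        hp.sublist ((t.dropWhile_sublist _).cons c)
      rw [pvHasK_cons_sorted c t hp 2, pvHasK_cons_sorted c t hp 3]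
      unfold pvRunScan
      simp only []
      by_cases h2' : (t.takeWhile (· == c)).length + 1 = 2
      · rw [if_pos h2', ih _ hrest_len hrest_sorted]
        have h3' : ¬ ((t.takeWhile (· == c)).length + 1 = 3) := by omega
        simp [h2']
      · rw [if_neg h2']
        by_cases h3' : (t.takeWhile (· == c)).length + 1 = 3
        · rw [if_pos h3', ih _ hrest_len hrest_sorted]
          simp [h3']
        · rw [if_neg h3', ih _ hrest_len hrest_sorted]
          simp [h2', h3']

-- pvHasK is invariant under permutation (sorting the box does not change letter counts)
lemma pvHasK_perm (l m : List Char) (hp : l.Perm m) (k : Nat) : pvHasK l k = pvHasK m k := by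
  rw [Bool.eq_iff_iff]
  unfold pvHasK
  simp only [List.any_eq_true, beq_iff_eq]
  constructor
  · rintro ⟨x, hx, hc⟩; exact ⟨x, hp.mem_iff.mp hx, by rw [← hp.count_eq]; exact hc⟩
  · rintro ⟨x, hx, hc⟩; exact ⟨x, hp.mem_iff.mpr hx, by rw [hp.count_eq]; exact hc⟩

lemma pvFlags (box : String) :
    pvRunScan (PySem.List.sorted box.toList (fun c => c) false) false false
      = (pvHasK box.toList 2, pvHasK box.toList 3) := by
  have hs : (PySem.List.sorted box.toList (fun c => c) false).Pairwise (· ≤ ·) :=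
    PySem.List.sorted_pairwise box.toList (fun c => c)
  rw [pvRunScan_eq _ _ (Nat.le_refl _) hs]
  rw [pvHasK_perm _ box.toList (PySem.List.sorted_perm box.toList (fun c => c) false) 2,
    pvHasK_perm _ box.toList (PySem.List.sorted_perm box.toList (fun c => c) false) 3]
  simp

-- fold accumulators
lemma pvFoldA_getD (box_ids : List String) (k : Nat) : ∀ d : PySem.Dict Int Int,
    (box_ids.foldl pvStepA d).getD (k : Int) 0
      = d.getD (k : Int) 0 + ((box_ids.countP (fun b => pvHasK b.toList k)) : Int) := by
  induction box_ids with
  | nil => intro d; simp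
  | cons b bs ih =>
    intro d
    rw [List.foldl_cons, ih, pvStepA_getD, List.countP_cons]
    by_cases hb : pvHasK b.toList k
    · simp [hb]; omega
    · simp [hb]

lemma pvFoldB (box_ids : List String) : ∀ (p : Int × Int),
    box_ids.foldl (fun (acc : Int × Int) box =>
      let s := PySem.List.sorted box.toList (fun c => c) false
      let f := pvRunScan s false false
      (acc.1 + (if f.1 then 1 else 0), acc.2 + (if f.2 then 1 else 0))) p
    = (p.1 + ((box_ids.countP (fun b => pvHasK b.toList 2)) : Int),
       p.2 + ((box_ids.countP (fun b => pvHasK b.toList 3)) : Int)) := by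
  induction box_ids with
  | nil => intro p; simp
  | cons x xs ih =>
    intro p
    rw [List.foldl_cons, ih, List.countP_cons, List.countP_cons]
    simp only [pvFlags]
    by_cases h2 : pvHasK x.toList 2 <;> by_cases h3 : pvHasK x.toList 3 <;>
      simp [h2, h3, Prod.ext_iff] <;> omega

-- ===== VERDICT (by name: the statement is the Claim_ definition above) =====
theorem count_boxes_spec : Claim_equal_count_boxes := by
  intro box_ids _
  unfold Spec_count_boxes count_boxes count_boxes_alt
  rw [pvFoldB]
  have h2 := pvFoldA_getD box_ids 2 PySem.Dict.empty
  have h3 := pvFoldA_getD box_ids 3 PySem.Dict.empty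
  simp only [Nat.cast_ofNat] at h2 h3
  have he : PySem.Dict.empty.getD (2:Int) (0:Int) = 0 := by decide
  have he3 : PySem.Dict.empty.getD (3:Int) (0:Int) = 0 := by decide
  simp only [h2, h3, he, he3, zero_add]
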